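-- pv_equiv track=rewrite | github.com/Ana-Maria-C/Python | lab3/ex6.py | unique_or_duplicate
-- ===== SOURCE A (Python) =====
-- def unique_or_duplicate(my_list):
--     duplicate_set = set()
--     unique_set = set()
--     for elem in my_list:
--         if elem in unique_set:
--             duplicate_set.add(elem)
--             unique_set.discard(elem)
--         else:
--             unique_set.add(elem)
--     return len(duplicate_set), len(unique_set)
-- ===== SOURCE B (Python) =====
-- def unique_or_duplicate(my_list):
--     counts = {}
--     for elem in my_list:
--         counts[elem] = counts.get(elem, 0) + 1
--     duplicates = sum(1 for c in counts.values() if c >= 2)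
--     uniques = sum(1 for c in counts.values() if c % 2 == 1)
--     return duplicates, uniques
-- ===== Notes on version B (the rewrite author's own statement) =====
-- stated objective: alternative
-- what changed: Replaced the single-pass two-set toggling stream with a tabulate-then-summarize structure: build a frequency map in one loop, then count values with frequency >= 2 (duplicates) and values with odd frequency (the toggled 'unique' set) in a second scan.
import Mathlib
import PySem

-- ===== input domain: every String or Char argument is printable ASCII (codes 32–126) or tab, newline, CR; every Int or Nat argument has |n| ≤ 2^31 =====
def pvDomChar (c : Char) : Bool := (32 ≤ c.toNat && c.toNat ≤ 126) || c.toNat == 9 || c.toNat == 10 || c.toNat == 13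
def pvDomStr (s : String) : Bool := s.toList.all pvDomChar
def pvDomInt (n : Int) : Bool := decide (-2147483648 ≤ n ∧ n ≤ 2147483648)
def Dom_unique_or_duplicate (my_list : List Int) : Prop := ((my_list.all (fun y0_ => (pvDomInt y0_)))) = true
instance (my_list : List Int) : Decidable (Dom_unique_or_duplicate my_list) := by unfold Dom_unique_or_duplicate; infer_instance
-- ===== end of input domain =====

-- B replaces A's single-pass two-set toggling with a frequency map built first and then
-- scanned (count >= 2 -> duplicate, odd count -> the toggled "unique"); same cost, different structure.


-- ===== PORT A =====
-- for elem in my_list: toggle elem between unique_set and duplicate_set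
def uodStep (st : PySem.Set Int × PySem.Set Int) (elem : Int) : PySem.Set Int × PySem.Set Int :=
  if PySem.Set.contains st.2 elem then
    (PySem.Set.add st.1 elem, PySem.Set.discard st.2 elem)
  else
    (st.1, PySem.Set.add st.2 elem)

def unique_or_duplicate (my_list : List Int) : Int × Int :=
  let r := my_list.foldl uodStep (PySem.Set.empty, PySem.Set.empty)
  (PySem.Set.len r.1, PySem.Set.len r.2)

-- ===== PORT B =====
def unique_or_duplicate_alt (my_list : List Int) : Int × Int :=
  let counts : PySem.Dict Int Int :=
    my_list.foldl (fun d x => d.insert x (d.getD x 0 + 1)) PySem.Dict.empty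
  let duplicates : Int := ((counts.values.filter (fun c => decide (2 ≤ c))).length : Int)
  let uniques : Int := ((counts.values.filter (fun c => decide (PySem.Int.mod c 2 = 1))).length : Int)
  (duplicates, uniques)

-- ===== PRECONDITION & SPEC =====
def Spec_unique_or_duplicate (my_list : List Int) (out : Int × Int) : Prop := out = unique_or_duplicate_alt my_list
instance (my_list : List Int) (out : Int × Int) : Decidable (Spec_unique_or_duplicate my_list out) := by unfold Spec_unique_or_duplicate; infer_instance

-- ===== CLAIM (what is proved, stated in full; the proofs are below) =====
def Claim_equal_unique_or_duplicate : Prop := ∀ (my_list : List Int), Dom_unique_or_duplicate my_list → Spec_unique_or_duplicate my_list (unique_or_duplicate my_list)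

-- ===== LEMMAS AND PROOFS =====

-- invariant of A's toggling loop: after processing l, the duplicate set holds exactly the
-- elements seen at least twice, the "unique" set exactly those seen an odd number of times
theorem uod_foldl_inv (l : List Int) :
    (l.foldl uodStep (PySem.Set.empty, PySem.Set.empty)).1.Nodup ∧
    (l.foldl uodStep (PySem.Set.empty, PySem.Set.empty)).2.Nodup ∧
    (∀ x, x ∈ (l.foldl uodStep (PySem.Set.empty, PySem.Set.empty)).1 ↔ 2 ≤ l.count x) ∧
    (∀ x, x ∈ (l.foldl uodStep (PySem.Set.empty, PySem.Set.empty)).2 ↔ l.count x % 2 = 1) := by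
  induction l using List.reverseRecOn with
  | nil => simp [PySem.Set.empty]
  | append_singleton l a ih =>
    obtain ⟨hd, hu, hdm, hum⟩ := ih
    rw [List.foldl_append, List.foldl_cons, List.foldl_nil]
    set st := l.foldl uodStep (PySem.Set.empty, PySem.Set.empty) with hst
    by_cases hmem : a ∈ st.2
    · have hca : l.count a % 2 = 1 := (hum a).mp hmem
      have hstep : uodStep st a = (PySem.Set.add st.1 a, PySem.Set.discard st.2 a) := by
        simp [uodStep, hmem]
      rw [hstep]
      refine ⟨PySem.Set.nodup_add st.1 a hd, PySem.Set.nodup_discard st.2 a hu, ?_, ?_⟩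
      · intro x
        rw [PySem.Set.mem_add, hdm x, List.count_append, List.count_singleton]
        by_cases hx : x = a
        · subst hx
          simp only [beq_self_eq_true, reduceIte, or_true, true_iff]
          omega
        · simp [hx, Ne.symm hx]
      · intro x
        rw [PySem.Set.mem_discard, hum x, List.count_append, List.count_singleton]
        by_cases hx : x = a
        · subst hx
          simp only [beq_self_eq_true, reduceIte, ne_eq, not_true_eq_false, and_false, false_iff]
          omega
        · simp [hx, Ne.symm hx]
    · have hca : ¬ (l.count a % 2 = 1) := fun h => hmem ((hum a).mpr h)
      have hstep : uodStep st a = (st.1, PySem.Set.add st.2 a) := by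
        simp [uodStep, hmem]
      rw [hstep]
      refine ⟨hd, PySem.Set.nodup_add st.2 a hu, ?_, ?_⟩
      · intro x
        rw [hdm x, List.count_append, List.count_singleton]
        by_cases hx : x = a
        · subst hx
          simp only [beq_self_eq_true, reduceIte]
          omega
        · simp [Ne.symm hx]
      · intro x
        rw [PySem.Set.mem_add, hum x, List.count_append, List.count_singleton]
        by_cases hx : x = a
        · subst hx
          simp only [beq_self_eq_true, reduceIte, or_true, true_iff]
          omega
        · simp [hx, Ne.symm hx]

-- B's list of stored counts is the count of each distinct element, in first-occurrence order
theorem uod_alt_values (l : List Int) :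
    (l.foldl (fun (d : PySem.Dict Int Int) x => d.insert x (d.getD x 0 + 1)) PySem.Dict.empty).values
      = (PySem.Set.ofList l).map (fun k => ((l.count k : Nat) : Int)) := by
  rw [PySem.Dict.foldl_insert_getD_add_one_eq_counter]
  show ((PySem.Dict.counter l).items.map (·.2)) = _
  rw [PySem.Dict.items_counter]
  simp

-- two Nodup lists with the same members have the same length
theorem length_eq_of_nodup_of_mem_iff {l₁ l₂ : List Int} (h₁ : l₁.Nodup) (h₂ : l₂.Nodup)
    (h : ∀ x, x ∈ l₁ ↔ x ∈ l₂) : l₁.length = l₂.length :=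
  ((List.perm_ext_iff_of_nodup h₁ h₂).mpr h).length_eq

-- ===== VERDICT (by name: the statement is the Claim_ definition above) =====
theorem unique_or_duplicate_spec : Claim_equal_unique_or_duplicate := by
  intro l _
  unfold Spec_unique_or_duplicate unique_or_duplicate unique_or_duplicate_alt
  dsimp only
  obtain ⟨hd, hu, hdm, hum⟩ := uod_foldl_inv l
  rw [uod_alt_values l]
  have hfm : ∀ (p : Int → Bool),
      (((PySem.Set.ofList l).map (fun k => ((l.count k : Nat) : Int))).filter p).length
        = ((PySem.Set.ofList l).filter (fun k => p ((l.count k : Nat) : Int))).length := by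
    intro p
    rw [List.filter_map]
    rw [List.length_map]
    rfl
  rw [Prod.mk.injEq]
  refine ⟨?_, ?_⟩
  · rw [hfm, PySem.Set.len]
    congr 1
    apply length_eq_of_nodup_of_mem_iff hd ((PySem.Set.nodup_ofList l).filter _)
    intro x
    rw [hdm x, List.mem_filter, PySem.Set.mem_ofList]
    constructor
    · intro h
      refine ⟨List.count_pos_iff.mp (by omega), by simpa using h⟩
    · intro ⟨_, h⟩
      simpa using h
  · rw [hfm, PySem.Set.len]
    congr 1
    apply length_eq_of_nodup_of_mem_iff hu ((PySem.Set.nodup_ofList l).filter _)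
    intro x
    rw [hum x, List.mem_filter, PySem.Set.mem_ofList]
    constructor
    · intro h
      refine ⟨List.count_pos_iff.mp (by omega), ?_⟩
      rw [decide_eq_true_iff, PySem.Int.mod_eq_emod_of_pos (by omega : (0:Int) < 2)]
      omega
    · intro ⟨_, h⟩
      rw [decide_eq_true_iff, PySem.Int.mod_eq_emod_of_pos (by omega : (0:Int) < 2)] at h
      omega
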